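-- pv_equiv track=rewrite | github.com/rodrigorjsf/project-agents-initializer | rag/chunker.py | _merge_splits
-- ===== SOURCE A (Python) =====
-- def _estimate_tokens(text: str) -> int:
--     """Rough token estimate (~75% accurate, sufficient for chunking)."""
--     return len(text.split())
--
-- def _merge_splits(
--     parts: list[str], max_tokens: int, overlap_tokens: int, separator: str
-- ) -> list[str]:
--     """Merge split parts back together up to max_tokens, with overlap."""
--     chunks = []
--     current_parts: list[str] = []
--     current_tokens = 0
--
--     for part in parts:
--         part_tokens = _estimate_tokens(part)
--         if current_tokens + part_tokens > max_tokens and current_parts: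
--             chunks.append(separator.join(current_parts))
--             # Overlap: keep last parts that fit within overlap_tokens
--             overlap_parts: list[str] = []
--             overlap_count = 0
--             for p in reversed(current_parts):
--                 pt = _estimate_tokens(p)
--                 if overlap_count + pt > overlap_tokens:
--                     break
--                 overlap_parts.insert(0, p)
--                 overlap_count += pt
--             current_parts = overlap_parts
--             current_tokens = overlap_count
--
--         current_parts.append(part)
--         current_tokens += part_tokens
--
--     if current_parts:
--         chunks.append(separator.join(current_parts))
--
--     return chunks
-- ===== SOURCE B (Python) =====
-- def _merge_splits(parts, max_tokens, overlap_tokens, separator):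
--     """Merge split parts into chunks up to max_tokens, with token overlap.
--
--     One global prefix-sum pass over cached per-part token counts; the current
--     chunk is the index window [s, i), and the overlap boundary is found by
--     binary search on the prefix sums instead of a backward rescan.
--     """
--     n = len(parts)
--     pre = [0] * (n + 1)
--     for i in range(n):
--         pre[i + 1] = pre[i] + len(parts[i].split())
--
--     chunks = []
--     s = 0
--     for i in range(n):
--         pt = pre[i + 1] - pre[i]
--         if pre[i] - pre[s] + pt > max_tokens and s < i:
--             chunks.append(separator.join(parts[s:i]))
--             # smallest j in [s, i] with pre[i] - pre[j] <= overlap_tokens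
--             lo, hi = s, i
--             while lo < hi:
--                 mid = (lo + hi) // 2
--                 if pre[i] - pre[mid] <= overlap_tokens:
--                     hi = mid
--                 else:
--                     lo = mid + 1
--             s = lo
--     if s < n:
--         chunks.append(separator.join(parts[s:]))
--     return chunks
-- ===== Notes on version B (the rewrite author's own statement) =====
-- stated objective: alternative
-- what changed: One global prefix-sum pass caches every part's token count, the current chunk is tracked as an index window into parts, and the overlap boundary is found by binary search on the prefix sums, replacing A's re-splitting of window parts and backward rescan at every flush.
import Mathlib
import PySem

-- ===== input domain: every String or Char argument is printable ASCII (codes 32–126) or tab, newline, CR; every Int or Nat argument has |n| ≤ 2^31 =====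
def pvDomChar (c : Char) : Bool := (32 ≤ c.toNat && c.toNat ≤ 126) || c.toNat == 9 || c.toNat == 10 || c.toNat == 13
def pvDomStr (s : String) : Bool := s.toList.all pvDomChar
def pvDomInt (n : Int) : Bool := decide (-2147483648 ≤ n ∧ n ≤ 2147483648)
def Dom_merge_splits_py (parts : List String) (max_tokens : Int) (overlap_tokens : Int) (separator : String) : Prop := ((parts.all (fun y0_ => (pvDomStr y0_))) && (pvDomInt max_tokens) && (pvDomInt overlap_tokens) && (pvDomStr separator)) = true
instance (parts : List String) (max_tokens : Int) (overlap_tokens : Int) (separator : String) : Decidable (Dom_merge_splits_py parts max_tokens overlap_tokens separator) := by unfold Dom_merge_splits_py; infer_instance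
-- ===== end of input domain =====

-- B replaces A's per-flush backward rescan (which re-splits window parts) by one global
-- prefix-sum pass over cached token counts plus binary search for the overlap boundary.

-- ===== PORT A =====

-- len(text.split())
def estTokens (s : String) : Int := ((PySem.Str.split₀ s).length : Int)

-- inner loop 'for p in reversed(current_parts): …' with break; called on cur.reverse
def overlapScanA (K : Int) : List String → List String → Int → List String × Int
  | [], acc, cnt => (acc, cnt)
  | p :: rest, acc, cnt =>
    let pt := estTokens p
    if cnt + pt > K then (acc, cnt)
    else overlapScanA K rest (p :: acc) (cnt + pt)

-- body of 'for part in parts', state (chunks, current_parts, current_tokens)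
def stepA (maxT K : Int) (sep : String) (st : List String × List String × Int) (part : String) :
    List String × List String × Int :=
  let pt := estTokens part
  let st' :=
    if st.2.2 + pt > maxT ∧ st.2.1 ≠ [] then
      let r := overlapScanA K st.2.1.reverse [] 0
      (st.1 ++ [PySem.Str.join sep st.2.1], r.1, r.2)
    else st
  (st'.1, st'.2.1 ++ [part], st'.2.2 + pt)

def merge_splits_py (parts : List String) (max_tokens : Int) (overlap_tokens : Int) (separator : String) : List String :=
  let st := parts.foldl (stepA max_tokens overlap_tokens separator) ([], [], 0)
  if st.2.1 ≠ [] then st.1 ++ [PySem.Str.join separator st.2.1] else st.1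

-- ===== PORT B =====

-- pre = [0]*(n+1); for i in range(n): pre[i+1] = pre[i] + len(parts[i].split())
def preFrom (acc : Int) : List String → List Int
  | [] => [acc]
  | p :: rest => acc :: preFrom (acc + estTokens p) rest

-- while lo < hi: mid=(lo+hi)//2; …  — smallest j in [lo,hi] with pv - pre[j] <= K (pre nondecreasing)
def bsearch (pre : List Int) (pv K : Int) (lo hi : Nat) : Nat :=
  if _h : lo < hi then
    let mid := (lo + hi) / 2
    if pv - pre.getD mid 0 ≤ K then bsearch pre pv K lo mid
    else bsearch pre pv K (mid + 1) hi
  else lo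
termination_by hi - lo
decreasing_by all_goals omega

-- body of 'for i in range(n)', state (chunks, s)
def stepB (parts : List String) (pre : List Int) (maxT K : Int) (sep : String)
    (st : List String × Nat) (i : Nat) : List String × Nat :=
  let pt := pre.getD (i + 1) 0 - pre.getD i 0
  if pre.getD i 0 - pre.getD st.2 0 + pt > maxT ∧ st.2 < i then
    (st.1 ++ [PySem.Str.join sep (PySem.List.slice parts (some (st.2 : Int)) (some (i : Int)))],
     bsearch pre (pre.getD i 0) K st.2 i)
  else st

def merge_splits_py_alt (parts : List String) (max_tokens : Int) (overlap_tokens : Int) (separator : String) : List String :=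
  let pre := preFrom 0 parts
  let st := (List.range parts.length).foldl (stepB parts pre max_tokens overlap_tokens separator) ([], 0)
  if st.2 < parts.length then
    st.1 ++ [PySem.Str.join separator (PySem.List.slice parts (some (st.2 : Int)) none)]
  else st.1

-- ===== PRECONDITION & SPEC =====
def Spec_merge_splits_py (parts : List String) (max_tokens : Int) (overlap_tokens : Int) (separator : String) (out : List String) : Prop := out = merge_splits_py_alt parts max_tokens overlap_tokens separator
instance (parts : List String) (max_tokens : Int) (overlap_tokens : Int) (separator : String) (out : List String) : Decidable (Spec_merge_splits_py parts max_tokens overlap_tokens separator out) := by unfold Spec_merge_splits_py; infer_instance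

-- ===== CLAIM (what is proved, stated in full; the proofs are below) =====
def Claim_equal_merge_splits_py : Prop := ∀ (parts : List String) (max_tokens : Int) (overlap_tokens : Int) (separator : String), Dom_merge_splits_py parts max_tokens overlap_tokens separator → Spec_merge_splits_py parts max_tokens overlap_tokens separator (merge_splits_py parts max_tokens overlap_tokens separator)

-- ===== LEMMAS AND PROOFS =====

def sumTok (l : List String) : Int := (l.map estTokens).sum

lemma est_nonneg (s : String) : 0 ≤ estTokens s := by
  simp [estTokens]

lemma sumTok_append (l₁ l₂ : List String) : sumTok (l₁ ++ l₂) = sumTok l₁ + sumTok l₂ := by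
  simp [sumTok]

lemma sumTok_nonneg (l : List String) : 0 ≤ sumTok l := by
  induction l with
  | nil => simp [sumTok]
  | cons p rest ih =>
    have := est_nonneg p
    simp only [sumTok, List.map_cons, List.sum_cons] at *
    omega

lemma preFrom_getD (l : List String) : ∀ (a : Int) (k : Nat), k ≤ l.length →
    (preFrom a l).getD k 0 = a + sumTok (l.take k) := by
  induction l with
  | nil =>
    intro a k hk
    have hk0 : k = 0 := by simpa using hk
    subst hk0
    simp [preFrom, sumTok]
  | cons p rest ih =>
    intro a k hk
    cases k with
    | zero => simp [preFrom, sumTok]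
    | succ k' =>
      simp only [preFrom, List.getD_cons_succ, List.take_succ_cons]
      rw [ih (a + estTokens p) k' (by simpa using hk)]
      simp [sumTok]
      ring

lemma sumTok_take_mono (l : List String) (k k' : Nat) (h : k ≤ k') :
    sumTok (l.take k) ≤ sumTok (l.take k') := by
  have : l.take k' = l.take k ++ (l.drop k).take (k' - k) := by
    rw [← List.take_add]
    congr 1
    omega
  rw [this, sumTok_append]
  have := sumTok_nonneg ((l.drop k).take (k' - k))
  omega

lemma sumTok_window (parts : List String) (k i : Nat) (hk : k ≤ i) :
    sumTok ((parts.drop k).take (i - k)) = sumTok (parts.take i) - sumTok (parts.take k) := by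
  have : parts.take i = parts.take k ++ (parts.drop k).take (i - k) := by
    rw [← List.take_add]
    congr 1
    omega
  rw [this, sumTok_append]
  ring

-- proof-only restatement of the inner backward scan
def greedy (K : Int) : List String → List String × Int
  | [] => ([], 0)
  | p :: rest =>
    let pt := estTokens p
    if pt > K then ([], 0)
    else ((greedy (K - pt) rest).1 ++ [p], (greedy (K - pt) rest).2 + pt)

lemma overlapScanA_eq_greedy (r : List String) : ∀ (K : Int) (acc : List String) (cnt : Int),
    overlapScanA K r acc cnt = ((greedy (K - cnt) r).1 ++ acc, cnt + (greedy (K - cnt) r).2) := by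
  induction r with
  | nil => intro K acc cnt; simp [overlapScanA, greedy]
  | cons p rest ih =>
    intro K acc cnt
    simp only [overlapScanA, greedy]
    by_cases h : cnt + estTokens p > K
    · rw [if_pos h, if_pos (by omega)]
      simp
    · rw [if_neg h, if_neg (by omega), ih]
      have : K - cnt - estTokens p = K - (cnt + estTokens p) := by ring
      simp [this]
      ring

lemma greedy_char (w : List String) : ∀ (K : Int) (d : Nat), d ≤ w.length →
    (∀ e, e < d → K < sumTok (w.drop e)) →
    (d < w.length → sumTok (w.drop d) ≤ K) →
    greedy K w.reverse = (w.drop d, sumTok (w.drop d)) := by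
  induction w using List.reverseRecOn with
  | nil =>
    intro K d hd _ _
    have hd0 : d = 0 := by simpa using hd
    subst hd0
    simp [greedy, sumTok]
  | append_singleton ys y ih =>
    intro K d hd H1 H2
    rw [List.reverse_append]
    simp only [List.reverse_singleton, List.singleton_append]
    by_cases hcase : d = ys.length + 1
    · -- keep nothing: the last element alone already exceeds K
      have h1 := H1 ys.length (by simp at hd ⊢; omega)
      have hdropl : (ys ++ [y]).drop ys.length = [y] := by
        simp
      rw [hdropl] at h1
      have hpt : estTokens y > K := by simpa [sumTok] using h1
      simp only [greedy]
      rw [if_pos hpt]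
      have hnil : (ys ++ [y]).drop d = [] := by
        apply List.drop_eq_nil_of_le
        simp
        omega
      rw [hnil]
      simp [sumTok]
    · have hd' : d ≤ ys.length := by simp at hd; omega
      have hdrop : (ys ++ [y]).drop d = ys.drop d ++ [y] :=
        List.drop_append_of_le_length hd'
      have h2 : sumTok (ys.drop d ++ [y]) ≤ K := by
        have := H2 (by simp; omega)
        rwa [hdrop] at this
      have hy : sumTok (ys.drop d ++ [y]) = sumTok (ys.drop d) + estTokens y := by
        simp [sumTok]
      have hpt : ¬ (estTokens y > K) := by
        have := sumTok_nonneg (ys.drop d)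
        omega
      simp only [greedy]
      rw [if_neg hpt]
      have ihr : greedy (K - estTokens y) ys.reverse = (ys.drop d, sumTok (ys.drop d)) := by
        apply ih (K - estTokens y) d hd'
        · intro e he
          have h1 := H1 e (by omega)
          have hdrope : (ys ++ [y]).drop e = ys.drop e ++ [y] :=
            List.drop_append_of_le_length (by omega)
          rw [hdrope, sumTok_append] at h1
          have hsy : sumTok [y] = estTokens y := by simp [sumTok]
          rw [hsy] at h1
          omega
        · intro _
          omega
      rw [ihr, hdrop, hy]

lemma bsearch_spec (pre : List Int) (pv K : Int) :
    ∀ (m lo hi : Nat), hi - lo ≤ m → lo ≤ hi →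
    (∀ k k', lo ≤ k → k ≤ k' → k' ≤ hi → pre.getD k 0 ≤ pre.getD k' 0) →
    lo ≤ bsearch pre pv K lo hi ∧ bsearch pre pv K lo hi ≤ hi ∧
    (∀ k, lo ≤ k → k < bsearch pre pv K lo hi → ¬(pv - pre.getD k 0 ≤ K)) ∧
    (bsearch pre pv K lo hi < hi → pv - pre.getD (bsearch pre pv K lo hi) 0 ≤ K) := by
  intro m
  induction m with
  | zero =>
    intro lo hi hm hle _
    have : lo = hi := by omega
    subst this
    rw [bsearch]
    simp
    omega
  | succ m' ih =>
    intro lo hi hm hle hmono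
    rw [bsearch]
    by_cases h : lo < hi
    · rw [dif_pos h]
      set mid := (lo + hi) / 2 with hmid
      have hmlo : lo ≤ mid := by omega
      have hmhi : mid < hi := by omega
      by_cases hp : pv - pre.getD mid 0 ≤ K
      · rw [if_pos hp]
        have ihs := ih lo mid (by omega) (by omega)
          (fun k k' hk hkk hk' => hmono k k' hk hkk (by omega))
        refine ⟨ihs.1, by omega, ihs.2.2.1, ?_⟩
        intro hlt
        by_cases he : bsearch pre pv K lo mid < mid
        · exact ihs.2.2.2 he
        · have : bsearch pre pv K lo mid = mid := by omega
          rw [this]; exact hp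
      · rw [if_neg hp]
        have ihs := ih (mid + 1) hi (by omega) (by omega)
          (fun k k' hk hkk hk' => hmono k k' (by omega) hkk hk')
        refine ⟨by omega, ihs.2.1, ?_, ihs.2.2.2⟩
        intro k hk hkr hPk
        by_cases hkm : mid + 1 ≤ k
        · exact ihs.2.2.1 k hkm hkr hPk
        · -- k ≤ mid, P k and pre monotone ⇒ P mid, contradiction
          have := hmono k mid hk (by omega) (by omega)
          omega
    · rw [dif_neg h]
      refine ⟨le_rfl, hle, ?_, ?_⟩ <;> intro <;> omega

-- the whole flush step: backward scan = binary-search boundary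
lemma overlap_eq (parts : List String) (K : Int) (s i : Nat) (hsi : s ≤ i) (hin : i ≤ parts.length) :
    s ≤ bsearch (preFrom 0 parts) ((preFrom 0 parts).getD i 0) K s i ∧
    bsearch (preFrom 0 parts) ((preFrom 0 parts).getD i 0) K s i ≤ i ∧
    overlapScanA K ((parts.drop s).take (i - s)).reverse [] 0
      = ((parts.drop (bsearch (preFrom 0 parts) ((preFrom 0 parts).getD i 0) K s i)).take
           (i - bsearch (preFrom 0 parts) ((preFrom 0 parts).getD i 0) K s i),
         (preFrom 0 parts).getD i 0
           - (preFrom 0 parts).getD (bsearch (preFrom 0 parts) ((preFrom 0 parts).getD i 0) K s i) 0) := by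
  set pre := preFrom 0 parts with hpre
  have hget : ∀ k, k ≤ parts.length → pre.getD k 0 = sumTok (parts.take k) := by
    intro k hk
    rw [hpre, preFrom_getD parts 0 k hk]
    ring
  have hmono : ∀ k k', s ≤ k → k ≤ k' → k' ≤ i → pre.getD k 0 ≤ pre.getD k' 0 := by
    intro k k' _ hkk hk'
    rw [hget k (by omega), hget k' (by omega)]
    exact sumTok_take_mono parts k k' hkk
  obtain ⟨hbl, hbu, hmin, hsat⟩ := bsearch_spec pre (pre.getD i 0) K (i - s) s i le_rfl hsi hmono
  set j := bsearch pre (pre.getD i 0) K s i with hj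
  refine ⟨hbl, hbu, ?_⟩
  set w := (parts.drop s).take (i - s) with hw
  have hwlen : w.length = i - s := by
    rw [hw]
    simp
    omega
  have hwdrop : ∀ e, e ≤ i - s → w.drop e = (parts.drop (s + e)).take (i - (s + e)) := by
    intro e he
    rw [hw, List.drop_take, List.drop_drop]
    congr 1
    omega
  have hwsum : ∀ e, e ≤ i - s → sumTok (w.drop e) = pre.getD i 0 - pre.getD (s + e) 0 := by
    intro e he
    rw [hwdrop e he, sumTok_window parts (s + e) i (by omega),
        hget i hin, hget (s + e) (by omega)]
  have hchar := greedy_char w K (j - s) (by omega)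
    (by
      intro e he
      have := hmin (s + e) (by omega) (by omega)
      rw [hwsum e (by omega)]
      omega)
    (by
      intro hdl
      have := hsat (by omega)
      rw [hwsum (j - s) (by omega)]
      have hsj : s + (j - s) = j := by omega
      rw [hsj]
      omega)
  have hjd : w.drop (j - s) = (parts.drop j).take (i - j) := by
    have := hwdrop (j - s) (by omega)
    have hsj : s + (j - s) = j := by omega
    rwa [hsj] at this
  have hsj : s + (j - s) = j := by omega
  rw [overlapScanA_eq_greedy]
  simp only [sub_zero, List.append_nil, zero_add]
  rw [hchar, hwsum (j - s) (by omega), hsj, hjd]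

lemma window_snoc (parts : List String) (k i : Nat) (hk : k ≤ i) (hi : i < parts.length) :
    (parts.drop k).take (i - k) ++ [parts[i]] = (parts.drop k).take (i + 1 - k) := by
  have h1 : i + 1 - k = (i - k) + 1 := by omega
  rw [h1, List.take_add_one]
  have h2 : (parts.drop k)[i - k]? = some parts[i] := by
    rw [List.getElem?_drop]
    have : k + (i - k) = i := by omega
    rw [this, List.getElem?_eq_getElem hi]
  rw [h2]
  simp

lemma window_ne (parts : List String) (k i : Nat) (hi : i ≤ parts.length) :
    ((parts.drop k).take (i - k) ≠ []) ↔ k < i := by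
  rw [← List.length_pos_iff_ne_nil]
  simp only [List.length_take, List.length_drop]
  omega

lemma est_getD (parts : List String) (i : Nat) (hi : i < parts.length) :
    estTokens parts[i] = (preFrom 0 parts).getD (i + 1) 0 - (preFrom 0 parts).getD i 0 := by
  rw [preFrom_getD parts 0 (i + 1) (by omega), preFrom_getD parts 0 i (by omega)]
  have : parts.take (i + 1) = parts.take i ++ [parts[i]] := by
    rw [List.take_add_one, List.getElem?_eq_getElem hi]
    simp
  rw [this, sumTok_append]
  have : sumTok [parts[i]] = estTokens parts[i] := by simp [sumTok]
  rw [this]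
  ring

lemma main_invariant (parts : List String) (maxT K : Int) (sep : String) :
    ∀ i, i ≤ parts.length →
    ((List.range i).foldl (stepB parts (preFrom 0 parts) maxT K sep) ([], 0)).2 ≤ i ∧
    (parts.take i).foldl (stepA maxT K sep) ([], [], 0)
      = (((List.range i).foldl (stepB parts (preFrom 0 parts) maxT K sep) ([], 0)).1,
         (parts.drop ((List.range i).foldl (stepB parts (preFrom 0 parts) maxT K sep) ([], 0)).2).take
           (i - ((List.range i).foldl (stepB parts (preFrom 0 parts) maxT K sep) ([], 0)).2),
         (preFrom 0 parts).getD i 0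
           - (preFrom 0 parts).getD ((List.range i).foldl (stepB parts (preFrom 0 parts) maxT K sep) ([], 0)).2 0) := by
  intro i
  induction i with
  | zero =>
    intro _
    simp
  | succ i ih =>
    intro hi1
    have hi : i < parts.length := by omega
    obtain ⟨hs, hA⟩ := ih (by omega)
    set pre := preFrom 0 parts with hpre
    set b := (List.range i).foldl (stepB parts pre maxT K sep) ([], 0) with hb
    rw [List.range_succ, List.foldl_append, List.foldl_cons, List.foldl_nil]
    have htake : parts.take (i + 1) = parts.take i ++ [parts[i]] := by
      rw [List.take_add_one, List.getElem?_eq_getElem hi]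
      simp
    rw [htake, List.foldl_append, List.foldl_cons, List.foldl_nil, hA, ← hb]
    have hpt : estTokens parts[i] = pre.getD (i + 1) 0 - pre.getD i 0 := by
      rw [hpre]; exact est_getD parts i hi
    clear_value pre b
    by_cases hc : pre.getD i 0 - pre.getD b.2 0 + (pre.getD (i + 1) 0 - pre.getD i 0) > maxT ∧ b.2 < i
    · -- flush step
      have hcondA : pre.getD i 0 - pre.getD b.2 0 + estTokens parts[i] > maxT ∧
          (parts.drop b.2).take (i - b.2) ≠ [] := by
        refine ⟨by rw [hpt]; omega, (window_ne parts b.2 i (by omega)).mpr hc.2⟩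
      obtain ⟨hbl, hbu, hscan⟩ := overlap_eq parts K b.2 i (by omega) (by omega)
      rw [← hpre] at hbl hbu hscan
      simp only [stepA, stepB]
      rw [if_pos hcondA, if_pos hc]
      simp only [hscan]
      have hslice : PySem.List.slice parts (some (b.2 : Int)) (some (i : Int))
          = (parts.drop b.2).take (i - b.2) := PySem.List.slice_natCast parts b.2 i
      set j := bsearch pre (pre.getD i 0) K b.2 i with hj
      refine ⟨by omega, ?_⟩
      rw [hslice, window_snoc parts j i hbu hi]
      have hfin : pre.getD i 0 - pre.getD j 0 + estTokens parts[i]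
          = pre.getD (i + 1) 0 - pre.getD j 0 := by rw [hpt]; ring
      rw [hfin]
    · -- no flush
      have hcondA : ¬ (pre.getD i 0 - pre.getD b.2 0 + estTokens parts[i] > maxT ∧
          (parts.drop b.2).take (i - b.2) ≠ []) := by
        rw [hpt, window_ne parts b.2 i (by omega)]
        omega
      simp only [stepA, stepB]
      rw [if_neg hcondA, if_neg hc]
      refine ⟨by omega, ?_⟩
      rw [window_snoc parts b.2 i hs hi]
      have hfin : pre.getD i 0 - pre.getD b.2 0 + estTokens parts[i]
          = pre.getD (i + 1) 0 - pre.getD b.2 0 := by rw [hpt]; ring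
      rw [hfin]

-- ===== VERDICT (by name: the statement is the Claim_ definition above) =====
theorem merge_splits_py_spec : Claim_equal_merge_splits_py := by
  intro parts maxT K sep _
  unfold Spec_merge_splits_py merge_splits_py merge_splits_py_alt
  obtain ⟨hs, hA⟩ := main_invariant parts maxT K sep parts.length le_rfl
  rw [List.take_length] at hA
  simp only []
  rw [hA]
  set b := (List.range parts.length).foldl (stepB parts (preFrom 0 parts) maxT K sep) ([], 0) with hb
  have hw : (parts.drop b.2).take (parts.length - b.2) = parts.drop b.2 := by
    apply List.take_of_length_le
    simp
  rw [hw]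
  by_cases hlt : b.2 < parts.length
  · rw [if_pos (by simp only [Ne, List.drop_eq_nil_iff]; omega), if_pos hlt,
        PySem.List.slice_from_natCast]
  · rw [if_neg (by simp only [Ne, List.drop_eq_nil_iff, not_not]; omega), if_neg hlt]
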